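-- pv_equiv track=rewrite | github.com/ManojKumarPatnaik/practice-alg | Solution/ValueOccurrences.py | solution
-- ===== SOURCE A (Python) =====
-- def solution(A):
--   """
--   Finds the minimum number of moves to achieve an array in which all values X that are present in the array occur exactly X times.
--
--   Args:
--     A: A sorted array of integers.
--
--   Returns:
--     The minimum number of moves.
--   """
--
--   # Create a dictionary to store the frequency of each element in the array.
--   freq = {}
--   for element in A:
--     freq[element] = freq.get(element, 0) + 1
--
--   # Count the number of moves required to make the frequency of each element equal to its value.
--   moves = 0
--   for element, count in freq.items():
--     if count > element:
--       # We can remove extra occurrences of the element.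
--       moves += count - element
--     elif count < element:
--       # We can insert new occurrences of the element. However, it is also possible to remove all occurrences of the element and insert a new occurrence. We need to choose the move that minimizes the number of moves.
--       moves += min(element - count, count)
--
--   return moves
-- ===== SOURCE B (Python) =====
-- def solution(A):
--   """Same result as A, but as a single fused pass over runs of a sorted copy:
--   no frequency dictionary is built at all."""
--   s = sorted(A)
--   moves = 0
--   i = 0
--   n = len(s)
--   while i < n:
--     j = i
--     while j < n and s[j] == s[i]:
--       j += 1
--     element, count = s[i], j - i
--     if count > element:
--       moves += count - element
--     elif count < element:
--       moves += min(element - count, count)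
--     i = j
--   return moves
-- ===== Notes on version B (the rewrite author's own statement) =====
-- stated objective: alternative
-- what changed: B builds no frequency dictionary: it sorts a copy and folds each consecutive equal run's contribution into the total in one fused two-pointer pass.
import Mathlib
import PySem

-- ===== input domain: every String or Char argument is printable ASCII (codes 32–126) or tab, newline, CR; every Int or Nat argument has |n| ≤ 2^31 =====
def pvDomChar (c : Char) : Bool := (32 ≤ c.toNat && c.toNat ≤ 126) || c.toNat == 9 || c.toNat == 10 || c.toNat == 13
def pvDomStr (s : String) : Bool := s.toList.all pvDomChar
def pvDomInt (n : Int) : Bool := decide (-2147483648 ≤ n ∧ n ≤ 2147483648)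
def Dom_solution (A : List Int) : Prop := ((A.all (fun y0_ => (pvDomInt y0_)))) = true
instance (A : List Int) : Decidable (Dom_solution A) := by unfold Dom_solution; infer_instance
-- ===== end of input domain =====

-- B sorts a copy and sums each consecutive run's contribution in one fused pass, instead of building a frequency dictionary and scanning it (alternative decomposition, same result).


-- ===== PORT A =====
def solution (A : List Int) : Int :=
  let freq := A.foldl (fun d x => d.insert x (d.getD x 0 + 1)) (PySem.Dict.empty : PySem.Dict Int Int)
  freq.items.foldl
    (fun moves p =>
      if p.2 > p.1 then moves + (p.2 - p.1)
      else if p.2 < p.1 then moves + min (p.1 - p.2) p.2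
      else moves) 0

-- ===== PORT B =====
-- transcription of B's outer while loop: each step consumes one run of equal elements
-- (the inner `while s[j] == s[i]` is the takeWhile, `i = j` is the dropWhile)
def solutionAltGo : List Int → Int → Int
  | [], moves => moves
  | x :: xs, moves =>
      let run := xs.takeWhile (fun y => y == x)
      let count : Int := 1 + run.length
      let moves' :=
        if count > x then moves + (count - x)
        else if count < x then moves + min (x - count) count
        else moves
      solutionAltGo (xs.dropWhile (fun y => y == x)) moves'
termination_by l _ => l.length
decreasing_by
  exact Nat.lt_succ_of_le (List.length_dropWhile_le _ _)

def solution_alt (A : List Int) : Int :=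
  solutionAltGo (PySem.List.sorted A (fun x => x) false) 0

-- ===== PRECONDITION & SPEC =====
def Spec_solution (A : List Int) (out : Int) : Prop := out = solution_alt A
instance (A : List Int) (out : Int) : Decidable (Spec_solution A out) := by unfold Spec_solution; infer_instance

-- ===== CLAIM (what is proved, stated in full; the proofs are below) =====
def Claim_equal_solution : Prop := ∀ (A : List Int), Dom_solution A → Spec_solution A (solution A)

-- ===== LEMMAS AND PROOFS =====

-- per-value contribution both programs add
def contrib (e c : Int) : Int :=
  if c > e then c - e else if c < e then min (e - c) c else 0

-- A's second loop is the sum of contributions over the distinct values of A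
theorem foldl_step_eq (l : List (Int × Int)) (m : Int) :
    l.foldl (fun moves p =>
      if p.2 > p.1 then moves + (p.2 - p.1)
      else if p.2 < p.1 then moves + min (p.1 - p.2) p.2
      else moves) m = m + (l.map (fun p => contrib p.1 p.2)).sum := by
  induction l generalizing m with
  | nil => simp
  | cons p t ih =>
      simp only [List.foldl_cons, List.map_cons, List.sum_cons, ih, contrib]
      split_ifs <;> ring

theorem solution_eq_sum (A : List Int) :
    solution A = ((PySem.Set.ofList A).map (fun k => contrib k (A.count k))).sum := by
  show (A.foldl (fun d x => d.insert x (d.getD x 0 + 1)) (PySem.Dict.empty : PySem.Dict Int Int)).items.foldl _ 0 = _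
  rw [PySem.Dict.foldl_insert_getD_add_one_eq_counter, PySem.Dict.items_counter,
    foldl_step_eq, List.map_map, zero_add]
  rfl

-- B's run loop, on a sorted list, is the same sum over that list's distinct values
theorem not_mem_dropWhile_beq (x : Int) (xs : List Int)
    (hxle : ∀ y ∈ xs, x ≤ y)
    (hp : (xs.dropWhile (fun y => y == x)).Pairwise (· ≤ ·)) :
    x ∉ xs.dropWhile (fun y => y == x) := by
  intro hx
  rcases hd : xs.dropWhile (fun y => y == x) with _ | ⟨y0, r⟩
  · rw [hd] at hx; simp at hx
  · have h0 : (y0 == x) = false := by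
      have := List.head_dropWhile_not (fun y => y == x) (l := xs)
      simp [hd] at this
      simpa using this
    have hsub := List.dropWhile_sublist (p := fun y => y == x) (l := xs)
    rw [hd] at hsub hx hp
    have hx0 : x ≤ y0 := hxle _ (hsub.subset List.mem_cons_self)
    rcases List.mem_cons.1 hx with rfl | hx
    · simp at h0
    · have h1 : y0 ≤ x := (List.pairwise_cons.1 hp).1 _ hx
      have : y0 = x := le_antisymm h1 hx0
      simp [this] at h0

theorem go_eq_sum_aux : ∀ (n : Nat) (s : List Int), s.length ≤ n → s.Pairwise (· ≤ ·) → ∀ m : Int,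
    solutionAltGo s m = m + ((PySem.Set.ofList s).map (fun k => contrib k (s.count k))).sum := by
  intro n
  induction n with
  | zero =>
      intro s hlen _ m
      have : s = [] := List.length_eq_zero_iff.1 (Nat.le_zero.1 hlen)
      subst this; simp [solutionAltGo, PySem.Set.ofList]
  | succ n ih =>
      intro s hlen hs m
      match s with
      | [] => simp [solutionAltGo, PySem.Set.ofList]
      | x :: xs =>
        set t := xs.takeWhile (fun y => y == x) with htdef
        set d := xs.dropWhile (fun y => y == x) with hddef
        have hsplit : t ++ d = xs := List.takeWhile_append_dropWhile
        have ht : ∀ y ∈ t, y = x := by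
          intro y hy
          have := List.mem_takeWhile_imp hy
          simpa using this
        have hxs_pair : xs.Pairwise (· ≤ ·) := (List.pairwise_cons.1 hs).2
        have hxle : ∀ y ∈ xs, x ≤ y := (List.pairwise_cons.1 hs).1
        have hd_pair : d.Pairwise (· ≤ ·) := hxs_pair.sublist (List.dropWhile_sublist _)
        have hxnotd : x ∉ d := by
          rw [hddef]
          exact not_mem_dropWhile_beq x xs hxle (by rw [← hddef]; exact hd_pair)
        have hcountt : t.count x = t.length := List.count_eq_length.2 (fun b hb => (ht b hb).symm)
        have hcount_x : ((x :: xs).count x : Int) = 1 + (t.length : Int) := by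
          rw [← hsplit]
          simp [List.count_append, hcountt, List.count_eq_zero.2 hxnotd]
          ring
        have hcount_other : ∀ k ∈ PySem.Set.ofList d, (x :: xs).count k = d.count k := by
          intro k hk
          have hkd : k ∈ d := (PySem.Set.mem_ofList _ _).1 hk
          have hkx : k ≠ x := fun h => hxnotd (h ▸ hkd)
          have hkt : k ∉ t := fun h => hkx (ht k h)
          rw [← hsplit]
          simp [List.count_append, List.count_eq_zero.2 hkt, Ne.symm hkx]
        have hperm : (PySem.Set.ofList (x :: xs)).Perm (x :: PySem.Set.ofList d) := by
          apply (List.perm_ext_iff_of_nodup (PySem.Set.nodup_ofList _) ?_).2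
          · intro k
            simp only [PySem.Set.mem_ofList, List.mem_cons]
            constructor
            · rintro (rfl | hk)
              · exact Or.inl rfl
              · rw [← hsplit] at hk
                rcases List.mem_append.1 hk with hk | hk
                · exact Or.inl (ht k hk)
                · exact Or.inr hk
            · rintro (rfl | hk)
              · exact Or.inl rfl
              · exact Or.inr (by rw [← hsplit]; exact List.mem_append.2 (Or.inr hk))
          · exact List.nodup_cons.2 ⟨fun h => hxnotd ((PySem.Set.mem_ofList _ _).1 h), PySem.Set.nodup_ofList _⟩
        have hlend : d.length ≤ n := by
          have h1 : d.length ≤ xs.length := by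
            rw [hddef]; exact (List.dropWhile_sublist _).length_le
          have h2 : (x :: xs).length = xs.length + 1 := List.length_cons
          omega
        have hih := ih d hlend hd_pair
        rw [solutionAltGo, ← htdef, ← hddef]
        rw [hih]
        rw [((hperm.map (fun k => contrib k ((x :: xs).count k)))).sum_eq]
        simp only [List.map_cons, List.sum_cons]
        rw [List.map_congr_left (l := PySem.Set.ofList d)
          (f := fun k => contrib k (((x :: xs).count k : Int)))
          (g := fun k => contrib k ((d.count k : Int)))
          (fun k hk => by simp [hcount_other k hk])]
        have hstep :
            (if 1 + (t.length : Int) > x then m + (1 + (t.length : Int) - x)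
             else if 1 + (t.length : Int) < x then m + min (x - (1 + (t.length : Int))) (1 + (t.length : Int))
             else m) = m + contrib x ((x :: xs).count x) := by
          rw [hcount_x, contrib]
          split_ifs <;> ring
        rw [hstep]
        ring

theorem go_eq_sum (s : List Int) (m : Int) (hs : s.Pairwise (· ≤ ·)) :
    solutionAltGo s m = m + ((PySem.Set.ofList s).map (fun k => contrib k (s.count k))).sum :=
  go_eq_sum_aux s.length s le_rfl hs m

-- ===== VERDICT (by name: the statement is the Claim_ definition above) =====
theorem solution_spec : Claim_equal_solution := by
  intro A _
  unfold Spec_solution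
  have hperm : (PySem.List.sorted A (fun x => x) false).Perm A := PySem.List.sorted_perm _ _ _
  rw [solution_eq_sum, solution_alt,
    go_eq_sum _ _ (by simpa using PySem.List.sorted_pairwise (xs := A) (key := fun x => x)), zero_add]
  have hmem : ∀ k, k ∈ PySem.Set.ofList (PySem.List.sorted A (fun x => x) false) ↔ k ∈ PySem.Set.ofList A := by
    intro k
    simp [PySem.Set.mem_ofList, hperm.mem_iff]
  have hsetperm : (PySem.Set.ofList (PySem.List.sorted A (fun x => x) false)).Perm (PySem.Set.ofList A) :=
    (List.perm_ext_iff_of_nodup (PySem.Set.nodup_ofList _) (PySem.Set.nodup_ofList _)).2 hmem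
  have hcount : ∀ k : Int, (PySem.List.sorted A (fun x => x) false).count k = A.count k :=
    fun k => hperm.count_eq k
  have := (hsetperm.map (fun k => contrib k (A.count k))).sum_eq
  rw [← this]
  congr 1
  exact List.map_congr_left (fun k _ => by rw [hcount])
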